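-- pv_equiv track=rewrite | github.com/BestSonginTheWorld/ai-usage-bar | legacy/xbar/ai_usage.5m.py | all_blockers_action_label
-- ===== SOURCE A (Python) =====
-- def has_blocker(provider):
--     blocker = provider.get("blocker")
--     return isinstance(blocker, dict) and bool(blocker.get("code"))
--
-- def all_blockers_action_label(providers):
--     blocker_codes = {
--         provider.get("blocker", {}).get("code")
--         for provider in providers
--         if isinstance(provider, dict) and has_blocker(provider)
--     }
--     if blocker_codes == {"trust_required"}:
--         return "Continue setup in Terminal"
--     return "Continue in Terminal"
-- ===== SOURCE B (Python) =====
-- def all_blockers_action_label(providers):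
--     saw_trust = False
--     for provider in providers:
--         if not isinstance(provider, dict):
--             continue
--         blocker = provider.get("blocker")
--         if not isinstance(blocker, dict):
--             continue
--         code = blocker.get("code")
--         if not code:
--             continue
--         if code != "trust_required":
--             return "Continue in Terminal"
--         saw_trust = True
--     return "Continue setup in Terminal" if saw_trust else "Continue in Terminal"
-- ===== Notes on version B (the rewrite author's own statement) =====
-- stated objective: simpler
-- what changed: B never builds the set of blocker codes: it short-circuits, returning 'Continue in Terminal' immediately at the first truthy code other than 'trust_required', and otherwise decides from a single saw_trust flag, whereas A always scans everything, allocates a set and compares it to a singleton.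
import Mathlib
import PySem

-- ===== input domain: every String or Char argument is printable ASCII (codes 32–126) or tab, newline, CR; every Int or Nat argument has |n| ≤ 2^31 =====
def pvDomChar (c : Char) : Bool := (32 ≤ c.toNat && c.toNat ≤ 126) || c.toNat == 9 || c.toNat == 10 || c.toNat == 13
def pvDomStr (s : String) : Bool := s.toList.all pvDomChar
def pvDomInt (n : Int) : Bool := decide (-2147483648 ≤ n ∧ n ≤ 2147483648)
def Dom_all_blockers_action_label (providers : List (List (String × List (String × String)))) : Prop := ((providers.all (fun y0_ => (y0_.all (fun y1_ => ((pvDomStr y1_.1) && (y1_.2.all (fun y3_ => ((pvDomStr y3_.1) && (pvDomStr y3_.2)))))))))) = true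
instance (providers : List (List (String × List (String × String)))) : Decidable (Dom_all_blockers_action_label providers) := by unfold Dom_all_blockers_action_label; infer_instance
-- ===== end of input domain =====

-- B replaces A's "build the set of truthy blocker codes and compare it with {'trust_required'}"
-- by a short-circuiting scan that returns at the first foreign truthy code: simpler, no set.

-- ===== PORT A =====
-- has_blocker(provider): blocker = provider.get("blocker"); isinstance(blocker, dict) and bool(blocker.get("code"))
-- (in the typed domain every value is a dict, so isinstance(provider/blocker, dict) is the get? succeeding)
def pvHasBlocker (provider : List (String × List (String × String))) : Bool :=
  match (PySem.Dict.mk provider).get? "blocker" with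
  | none => false
  | some blocker => !((PySem.Dict.mk blocker).getD "code" "").isEmpty

-- the set-comprehension element provider.get("blocker", {}).get("code"); under the has_blocker guard
-- the blocker and its code are present, so the defaults are never the value used
def pvCode (provider : List (String × List (String × String))) : String :=
  (PySem.Dict.mk ((PySem.Dict.mk provider).getD "blocker" [])).getD "code" ""

def all_blockers_action_label (providers : List (List (String × List (String × String)))) : String :=
  let blocker_codes : PySem.Set String :=
    providers.foldl (fun s provider =>
      if pvHasBlocker provider then PySem.Set.add s (pvCode provider) else s)
      PySem.Set.empty
  if PySem.Set.equal blocker_codes ["trust_required"] then "Continue setup in Terminal"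
  else "Continue in Terminal"

-- ===== PORT B =====
-- the for-loop of Source B: 'continue' branches recurse on the tail, the early 'return' stops,
-- 'saw_trust = True' recurses with the flag set; the final 'return' is the [] case
def pvScanB : List (List (String × List (String × String))) → Bool → String
  | [], saw_trust =>
      if saw_trust then "Continue setup in Terminal" else "Continue in Terminal"
  | provider :: rest, saw_trust =>
      match (PySem.Dict.mk provider).get? "blocker" with
      | none => pvScanB rest saw_trust
      | some blocker =>
        match (PySem.Dict.mk blocker).get? "code" with
        | none => pvScanB rest saw_trust
        | some code =>
          if code.isEmpty then pvScanB rest saw_trust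
          else if code = "trust_required" then pvScanB rest true
          else "Continue in Terminal"

def all_blockers_action_label_alt (providers : List (List (String × List (String × String)))) : String :=
  pvScanB providers false

-- ===== PRECONDITION & SPEC =====
def Spec_all_blockers_action_label (providers : List (List (String × List (String × String)))) (out : String) : Prop := out = all_blockers_action_label_alt providers
instance (providers : List (List (String × List (String × String)))) (out : String) : Decidable (Spec_all_blockers_action_label providers out) := by unfold Spec_all_blockers_action_label; infer_instance

-- ===== CLAIM (what is proved, stated in full; the proofs are below) =====
def Claim_equal_all_blockers_action_label : Prop := ∀ (providers : List (List (String × List (String × String)))), Dom_all_blockers_action_label providers → Spec_all_blockers_action_label providers (all_blockers_action_label providers)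

-- ===== LEMMAS AND PROOFS =====

-- A's fold only ever adds elements: membership in the accumulator persists
theorem pv_fold_mono (ps : List (List (String × List (String × String))))
    (s : PySem.Set String) (x : String) (hx : x ∈ s) :
    x ∈ ps.foldl (fun s provider =>
      if pvHasBlocker provider then PySem.Set.add s (pvCode provider) else s) s := by
  induction ps generalizing s with
  | nil => exact hx
  | cons p ps ih =>
    simp only [List.foldl_cons]
    by_cases h : pvHasBlocker p = true
    · rw [if_pos h]; exact ih _ ((PySem.Set.mem_add s _ x).2 (Or.inl hx))
    · rw [if_neg h]; exact ih _ hx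

-- invariant: B's scan, entered with saw_trust recording "trust_required ∈ s" and s containing
-- nothing but trust_required, computes exactly A's label for the set fold continued from s
theorem pv_inv (ps : List (List (String × List (String × String)))) :
    ∀ (s : PySem.Set String) (saw : Bool),
    (saw = true ↔ "trust_required" ∈ s) →
    (∀ x ∈ s, x = "trust_required") →
    pvScanB ps saw =
      (if PySem.Set.equal (ps.foldl (fun s provider =>
          if pvHasBlocker provider then PySem.Set.add s (pvCode provider) else s) s)
          ["trust_required"] = true
       then "Continue setup in Terminal" else "Continue in Terminal") := by
  induction ps with
  | nil =>
    intro s saw hsaw hsub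
    simp only [List.foldl_nil, pvScanB]
    by_cases h : saw = true
    · have ht : "trust_required" ∈ s := hsaw.1 h
      have he : PySem.Set.equal s ["trust_required"] = true := by
        rw [PySem.Set.equal_iff]
        intro x
        simp only [List.mem_singleton]
        exact ⟨fun hx => hsub x hx, fun hx => hx ▸ ht⟩
      rw [if_pos h, if_pos he]
    · have ht : "trust_required" ∉ s := fun hm => h (hsaw.2 hm)
      have he : ¬ PySem.Set.equal s ["trust_required"] = true := by
        intro he
        exact ht (((PySem.Set.equal_iff s _).1 he "trust_required").2 (by simp))
      rw [if_neg h, if_neg he]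
  | cons p ps ih =>
    intro s saw hsaw hsub
    simp only [List.foldl_cons]
    rcases hb : (PySem.Dict.mk p).get? "blocker" with _ | blocker
    · have h1 : pvHasBlocker p = false := by simp [pvHasBlocker, hb]
      have hL : pvScanB (p :: ps) saw = pvScanB ps saw := by simp [pvScanB, hb]
      rw [hL]
      simp only [h1, Bool.false_eq_true, if_false]
      exact ih s saw hsaw hsub
    · rcases hc : (PySem.Dict.mk blocker).get? "code" with _ | code
      · have h1 : pvHasBlocker p = false := by
          simp [pvHasBlocker, hb, PySem.Dict.getD_eq_get?_getD, hc]
        have hL : pvScanB (p :: ps) saw = pvScanB ps saw := by simp [pvScanB, hb, hc]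
        rw [hL]
        simp only [h1, Bool.false_eq_true, if_false]
        exact ih s saw hsaw hsub
      · have hcd : (PySem.Dict.mk blocker).getD "code" "" = code := by
          rw [PySem.Dict.getD_eq_get?_getD, hc]; rfl
        by_cases he : code.isEmpty
        · have h1 : pvHasBlocker p = false := by simp [pvHasBlocker, hb, hcd, he]
          have hL : pvScanB (p :: ps) saw = pvScanB ps saw := by
            simp [pvScanB, hb, hc, he]
          rw [hL]
          simp only [h1, Bool.false_eq_true, if_false]
          exact ih s saw hsaw hsub
        · have h1 : pvHasBlocker p = true := by simp [pvHasBlocker, hb, hcd, he]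
          have hbd : (PySem.Dict.mk p).getD "blocker" [] = blocker := by
            rw [PySem.Dict.getD_eq_get?_getD, hb]; rfl
          have hcode : pvCode p = code := by rw [pvCode, hbd, hcd]
          simp only [h1, if_true, hcode]
          by_cases htr : code = "trust_required"
          · have hL : pvScanB (p :: ps) saw = pvScanB ps true := by
              simp [pvScanB, hb, hc, htr]
            rw [hL]
            subst htr
            refine ih _ true ?_ ?_
            · simp [PySem.Set.mem_add]
            · intro x hx
              rcases (PySem.Set.mem_add s _ x).1 hx with h | h
              · exact hsub x h
              · exact h
          · have hL : pvScanB (p :: ps) saw = "Continue in Terminal" := by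
              simp [pvScanB, hb, hc, he, htr]
            rw [hL]
            have hmem : code ∈ ps.foldl (fun s provider =>
                if pvHasBlocker provider then PySem.Set.add s (pvCode provider) else s)
                (PySem.Set.add s code) :=
              pv_fold_mono ps _ code ((PySem.Set.mem_add s code code).2 (Or.inr rfl))
            have hne : ¬ PySem.Set.equal (ps.foldl (fun s provider =>
                if pvHasBlocker provider then PySem.Set.add s (pvCode provider) else s)
                (PySem.Set.add s code)) ["trust_required"] = true := by
              intro heq
              have := ((PySem.Set.equal_iff _ _).1 heq code).1 hmem
              simp only [List.mem_singleton] at this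
              exact htr this
            rw [if_neg hne]

-- ===== VERDICT (by name: the statement is the Claim_ definition above) =====
theorem all_blockers_action_label_spec : Claim_equal_all_blockers_action_label := by
  intro providers _
  unfold Spec_all_blockers_action_label all_blockers_action_label all_blockers_action_label_alt
  rw [pv_inv providers PySem.Set.empty false (by simp [PySem.Set.empty]) (by simp [PySem.Set.empty])]
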